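-- pv_equiv track=rewrite | github.com/Paneerselvam07/Python-Solutions | ValidTimes.py | solution
-- ===== SOURCE A (Python) =====
-- from itertools import permutations
--
-- def solution(A,B,C,D):
--     s1=str(A)
--     s2=str(B)
--     s3=str(C)
--     s4=str(D)
--     a=s1+s2+s3+s4
--     op=set()
--     le= [x.lower() for x in a]
--     for n in range(2,len(a)):
--         for y in list(permutations(le)):
--             hr1=int(y[0])*10
--             hr2=int(y[1])
--             m1=int(y[2])*10
--             m2=int(y[3])
--             hrs=hr1+hr2
--             mins=m1+m2
--             if 60> mins >=0 and 24 > hrs >=0: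
--                 hour=str(hrs)
--                 minutes=str(mins)
--                 time=hour+":"+minutes
--                 op.add(time)
--     return(len(op))
-- ===== SOURCE B (Python) =====
-- def solution(A, B, C, D):
--     s = list(str(A) + str(B) + str(C) + str(D))
--     times = set()
--     for h in range(24):
--         for m in range(60):
--             need = [str(h // 10), str(h % 10), str(m // 10), str(m % 10)]
--             if all(need.count(c) <= s.count(c) for c in need):
--                 times.add(str(h) + ":" + str(m))
--     return len(times)
-- ===== Notes on version B (the rewrite author's own statement) =====
-- stated objective: faster
-- what changed: B enumerates the 1440 candidate times (h,m) directly and keeps those whose four digits form a sub-multiset of the input's digits (a count comparison), instead of materialising all n! permutations of the digit string n-2 times.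
import Mathlib
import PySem

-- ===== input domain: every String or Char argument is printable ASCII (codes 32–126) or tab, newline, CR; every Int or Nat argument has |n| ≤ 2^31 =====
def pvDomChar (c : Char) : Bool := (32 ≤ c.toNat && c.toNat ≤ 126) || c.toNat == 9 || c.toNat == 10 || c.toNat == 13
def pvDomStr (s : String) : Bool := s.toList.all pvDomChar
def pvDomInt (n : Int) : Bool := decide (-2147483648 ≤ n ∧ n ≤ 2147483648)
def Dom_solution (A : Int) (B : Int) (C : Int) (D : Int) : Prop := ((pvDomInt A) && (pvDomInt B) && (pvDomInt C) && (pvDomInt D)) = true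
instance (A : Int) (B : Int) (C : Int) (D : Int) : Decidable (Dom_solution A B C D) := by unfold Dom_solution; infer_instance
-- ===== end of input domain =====

-- B replaces A's n·n! sweep over all permutations of the digit string by a direct scan of the
-- 1440 candidate clock times, keeping those whose digits form a sub-multiset of the input digits (faster).


-- ===== PORT A =====
-- int(x) for a one-character string; the getD 0 default is unreachable under Pre_ (all chars are digits there)
def pvChInt (c : Char) : Int := (PySem.Int.ofChars? [c]).getD 0

-- body of A's inner 'for y in list(permutations(le))' loop
def pvStepA (op : PySem.Set String) (y : List Char) : PySem.Set String :=
  let hr1 := pvChInt (PySem.List.pyGetD y 0 ' ') * 10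
  let hr2 := pvChInt (PySem.List.pyGetD y 1 ' ')
  let m1 := pvChInt (PySem.List.pyGetD y 2 ' ') * 10
  let m2 := pvChInt (PySem.List.pyGetD y 3 ' ')
  let hrs := hr1 + hr2
  let mins := m1 + m2
  if (mins < 60 ∧ 0 ≤ mins) ∧ (hrs < 24 ∧ 0 ≤ hrs) then
    PySem.Set.add op (PySem.Int.toStr hrs ++ ":" ++ PySem.Int.toStr mins)
  else op

def solution (A : Int) (B : Int) (C : Int) (D : Int) : Int :=
  let s1 := PySem.Int.toChars A
  let s2 := PySem.Int.toChars B
  let s3 := PySem.Int.toChars C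
  let s4 := PySem.Int.toChars D
  let a := s1 ++ s2 ++ s3 ++ s4
  let le := List.map PySem.Chars.lowerChar a
  let op := (PySem.List.pyRange 2 (PySem.List.len a) 1).foldl
      (fun op _ => (PySem.List.permutations le le.length).foldl pvStepA op) PySem.Set.empty
  PySem.Set.len op

-- ===== PORT B =====
-- body of B's inner 'for m in range(60)' loop
def pvStepB (s : List Char) (h : Int) (ts : PySem.Set String) (m : Int) : PySem.Set String :=
  let need := PySem.Int.toChars (PySem.Int.floordiv h 10) ++ PySem.Int.toChars (PySem.Int.mod h 10) ++
              PySem.Int.toChars (PySem.Int.floordiv m 10) ++ PySem.Int.toChars (PySem.Int.mod m 10)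
  if need.all (fun c => decide (PySem.List.count need c ≤ PySem.List.count s c)) then
    PySem.Set.add ts (PySem.Int.toStr h ++ ":" ++ PySem.Int.toStr m)
  else ts

def solution_alt (A : Int) (B : Int) (C : Int) (D : Int) : Int :=
  let s := PySem.Int.toChars A ++ PySem.Int.toChars B ++ PySem.Int.toChars C ++ PySem.Int.toChars D
  let times := (PySem.List.pyRange 0 24 1).foldl
      (fun ts h => (PySem.List.pyRange 0 60 1).foldl (pvStepB s h) ts) PySem.Set.empty
  PySem.Set.len times

-- ===== PRECONDITION & SPEC =====
-- Pre_ excludes exactly the inputs on which A raises: any negative argument puts a '-' in the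
-- digit pool and some permutation feeds it to int(), a ValueError.
def Pre_solution (A : Int) (B : Int) (C : Int) (D : Int) : Prop := 0 ≤ A ∧ 0 ≤ B ∧ 0 ≤ C ∧ 0 ≤ D
instance (A : Int) (B : Int) (C : Int) (D : Int) : Decidable (Pre_solution A B C D) := by unfold Pre_solution; infer_instance
def pvWitness_solution : Int × Int × Int × Int := (1, 2, 3, 4)

def Spec_solution (A : Int) (B : Int) (C : Int) (D : Int) (out : Int) : Prop := out = solution_alt A B C D
instance (A : Int) (B : Int) (C : Int) (D : Int) (out : Int) : Decidable (Spec_solution A B C D out) := by unfold Spec_solution; infer_instance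

-- ===== CLAIM (what is proved, stated in full; the proofs are below) =====
def Claim_equal_solution : Prop := ∀ (A : Int) (B : Int) (C : Int) (D : Int), Dom_solution A B C D → Pre_solution A B C D → Spec_solution A B C D (solution A B C D)

-- ===== LEMMAS AND PROOFS =====

-- proof-side views of the two loop bodies
def pvCondA (y : List Char) : Prop :=
  let hrs := pvChInt (PySem.List.pyGetD y 0 ' ') * 10 + pvChInt (PySem.List.pyGetD y 1 ' ')
  let mins := pvChInt (PySem.List.pyGetD y 2 ' ') * 10 + pvChInt (PySem.List.pyGetD y 3 ' ')
  (mins < 60 ∧ 0 ≤ mins) ∧ (hrs < 24 ∧ 0 ≤ hrs)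

def pvTimeA (y : List Char) : String :=
  PySem.Int.toStr (pvChInt (PySem.List.pyGetD y 0 ' ') * 10 + pvChInt (PySem.List.pyGetD y 1 ' ')) ++ ":" ++
  PySem.Int.toStr (pvChInt (PySem.List.pyGetD y 2 ' ') * 10 + pvChInt (PySem.List.pyGetD y 3 ' '))

def pvTime (h m : Int) : String := PySem.Int.toStr h ++ ":" ++ PySem.Int.toStr m

def pvNeed (h m : Int) : List Char :=
  PySem.Int.toChars (PySem.Int.floordiv h 10) ++ PySem.Int.toChars (PySem.Int.mod h 10) ++
  PySem.Int.toChars (PySem.Int.floordiv m 10) ++ PySem.Int.toChars (PySem.Int.mod m 10)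

def pvCondB (s : List Char) (h m : Int) : Prop :=
  ((pvNeed h m).all (fun c => decide (PySem.List.count (pvNeed h m) c ≤ PySem.List.count s c))) = true

lemma pv_mem_stepA (op : PySem.Set String) (y : List Char) (t : String) :
    t ∈ pvStepA op y ↔ t ∈ op ∨ (pvCondA y ∧ t = pvTimeA y) := by
  simp only [pvStepA, pvCondA, pvTimeA]
  split_ifs with h
  · rw [PySem.Set.mem_add]; tauto
  · tauto

lemma pv_mem_stepB (s : List Char) (h : Int) (ts : PySem.Set String) (m : Int) (t : String) :
    t ∈ pvStepB s h ts m ↔ t ∈ ts ∨ (pvCondB s h m ∧ t = pvTime h m) := by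
  simp only [pvStepB, pvCondB, pvNeed, pvTime]
  split_ifs with h
  · rw [PySem.Set.mem_add]; tauto
  · tauto

lemma pv_nodup_stepA (op : PySem.Set String) (y : List Char) (h : op.Nodup) : (pvStepA op y).Nodup := by
  simp only [pvStepA]
  split_ifs with hc
  · exact PySem.Set.nodup_add _ _ h
  · exact h

lemma pv_nodup_stepB (s : List Char) (h : Int) (ts : PySem.Set String) (m : Int) (hn : ts.Nodup) :
    (pvStepB s h ts m).Nodup := by
  simp only [pvStepB]
  split_ifs with hc
  · exact PySem.Set.nodup_add _ _ hn
  · exact hn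

-- generic: a fold whose step only inserts, characterised by membership
lemma pv_mem_foldl {β : Type} (step : PySem.Set String → β → PySem.Set String)
    (Q : β → String → Prop)
    (hstep : ∀ s y t, t ∈ step s y ↔ t ∈ s ∨ Q y t) :
    ∀ (L : List β) (s : PySem.Set String) (t : String),
      t ∈ L.foldl step s ↔ t ∈ s ∨ ∃ y ∈ L, Q y t := by
  intro L
  induction L with
  | nil => simp
  | cons x L ih =>
    intro s t
    simp only [List.foldl_cons, ih, hstep]
    constructor
    · rintro ((h | h) | ⟨y, hy, hq⟩)
      · exact Or.inl h
      · exact Or.inr ⟨x, by simp, h⟩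
      · exact Or.inr ⟨y, by simp [hy], hq⟩
    · rintro (h | ⟨y, hy, hq⟩)
      · exact Or.inl (Or.inl h)
      · rcases List.mem_cons.mp hy with rfl | hy
        · exact Or.inl (Or.inr hq)
        · exact Or.inr ⟨y, hy, hq⟩

lemma pv_nodup_foldl {β : Type} (step : PySem.Set String → β → PySem.Set String)
    (hstep : ∀ s y, s.Nodup → (step s y).Nodup) :
    ∀ (L : List β) (s : PySem.Set String), s.Nodup → (L.foldl step s).Nodup := by
  intro L
  induction L with
  | nil => intro s h; simpa using h
  | cons x L ih => intro s h; exact ih _ (hstep _ _ h)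

-- membership in PySem.List.permutations: exactly the length-r sub-permutations
lemma pv_mem_permutations {α : Type} :
    ∀ (r : ℕ) (xs p : List α), p ∈ PySem.List.permutations xs r ↔ p.length = r ∧ p.Subperm xs := by
  intro r
  induction r with
  | zero =>
    intro xs p
    constructor
    · rintro h; simp [PySem.List.permutations_zero] at h; subst h; exact ⟨rfl, List.nil_subperm⟩
    · rintro ⟨h, _⟩; rw [List.length_eq_zero_iff] at h; subst h; simp [PySem.List.permutations_zero]
  | succ r ih =>
    intro xs p
    rw [PySem.List.permutations_succ]
    simp only [List.mem_flatMap, List.mem_range]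
    constructor
    · rintro ⟨i, hi, hp⟩
      rcases h : xs[i]? with _ | x
      · rw [h] at hp; simp at hp
      · rw [h] at hp
        simp only [List.mem_map] at hp
        rcases hp with ⟨q, hq, rfl⟩
        rcases (ih _ _).mp hq with ⟨hlen, hsub⟩
        refine ⟨by simp [hlen], ?_⟩
        have h1 : (x :: q).Subperm (x :: xs.eraseIdx i) := (List.subperm_cons x).mpr hsub
        exact h1.trans (PySem.List.perm_cons_eraseIdx xs h).subperm
    · rintro ⟨hlen, hsub⟩
      cases p with
      | nil => simp at hlen
      | cons x q =>
        have hx : x ∈ xs := hsub.subset (by simp)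
        rcases List.getElem_of_mem hx with ⟨i, hi, hxi⟩
        refine ⟨i, hi, ?_⟩
        have hget : xs[i]? = some x := by rw [List.getElem?_eq_getElem hi, hxi]
        rw [hget]
        simp only [List.mem_map]
        refine ⟨q, ?_, rfl⟩
        apply (ih _ _).mpr
        refine ⟨by simpa using hlen, ?_⟩
        have hperm : xs.Perm (x :: xs.eraseIdx i) := (PySem.List.perm_cons_eraseIdx xs hget).symm
        have : (x :: q).Subperm (x :: xs.eraseIdx i) := hsub.trans hperm.subperm
        exact (List.subperm_cons x).mp this

-- any sub-permutation can be completed to a full permutation having it as prefix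
lemma pv_exists_perm_with_prefix {α : Type} [DecidableEq α] (q xs : List α) (h : q.Subperm xs) :
    ∃ y, y.Perm xs ∧ q <+: y := by
  have hle : (q : Multiset α) ≤ (xs : Multiset α) := Multiset.coe_le.mpr h
  refine ⟨q ++ ((xs : Multiset α) - (q : Multiset α)).toList, ?_, List.prefix_append _ _⟩
  rw [← Multiset.coe_eq_coe, ← Multiset.coe_add, Multiset.coe_toList, add_tsub_cancel_of_le hle]

-- digit characters
lemma pv_toChars_digit (d : ℕ) (hd : d < 10) :
    PySem.Int.toChars (d : Int) = [Char.ofNat (48 + d)] := by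
  interval_cases d <;> decide

lemma pv_chInt_digit (d : ℕ) (hd : d < 10) : pvChInt (Char.ofNat (48 + d)) = (d : Int) := by
  interval_cases d <;> decide

lemma pv_lowerChar_digit (d : ℕ) (hd : d < 10) :
    PySem.Chars.lowerChar (Char.ofNat (48 + d)) = Char.ofNat (48 + d) := by
  interval_cases d <;> decide

lemma pv_mem_toChars_digit (n : Int) (hn : 0 ≤ n) (c : Char) (hc : c ∈ PySem.Int.toChars n) :
    ∃ d : ℕ, d < 10 ∧ c = Char.ofNat (48 + d) := by
  unfold PySem.Int.toChars at hc
  rw [if_neg (by omega)] at hc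
  have hdig : c.isDigit = true := Nat.isDigit_of_mem_toDigits (by norm_num) (by norm_num) hc
  have h48 : 48 ≤ c.toNat ∧ c.toNat ≤ 57 := by
    simp [Char.isDigit] at hdig
    exact ⟨hdig.1, hdig.2⟩
  refine ⟨c.toNat - 48, by omega, ?_⟩
  have h : 48 + (c.toNat - 48) = c.toNat := by omega
  rw [h]
  exact (Char.ofNat_toNat c).symm

lemma pv_toChars_ne_nil (n : Int) : PySem.Int.toChars n ≠ [] := by
  unfold PySem.Int.toChars
  split
  · simp
  · have := @Nat.length_toDigits_pos 10 n.toNat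
    intro h; rw [h] at this; simp at this

-- pyGetD on an explicit 4-prefix
lemma pv_getD0 (e0 e1 e2 e3 : Char) (rest : List Char) :
    PySem.List.pyGetD (e0::e1::e2::e3::rest) 0 ' ' = e0 := by
  rw [(by norm_num : (0:ℤ) = ((0:ℕ):ℤ)), PySem.List.pyGetD_natCast]
  rfl
lemma pv_getD1 (e0 e1 e2 e3 : Char) (rest : List Char) :
    PySem.List.pyGetD (e0::e1::e2::e3::rest) 1 ' ' = e1 := by
  rw [(by norm_num : (1:ℤ) = ((1:ℕ):ℤ)), PySem.List.pyGetD_natCast]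
  rfl
lemma pv_getD2 (e0 e1 e2 e3 : Char) (rest : List Char) :
    PySem.List.pyGetD (e0::e1::e2::e3::rest) 2 ' ' = e2 := by
  rw [(by norm_num : (2:ℤ) = ((2:ℕ):ℤ)), PySem.List.pyGetD_natCast]
  rfl
lemma pv_getD3 (e0 e1 e2 e3 : Char) (rest : List Char) :
    PySem.List.pyGetD (e0::e1::e2::e3::rest) 3 ' ' = e3 := by
  rw [(by norm_num : (3:ℤ) = ((3:ℕ):ℤ)), PySem.List.pyGetD_natCast]
  rfl

-- the four digit characters B builds for a candidate (h, m)
lemma pv_need_eq (d0 d1 d2 d3 : ℕ) (h0 : d0 < 10) (h1 : d1 < 10) (h2 : d2 < 10) (h3 : d3 < 10) :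
    pvNeed ((d0*10+d1 : ℕ) : ℤ) ((d2*10+d3 : ℕ) : ℤ) =
      [Char.ofNat (48+d0), Char.ofNat (48+d1), Char.ofNat (48+d2), Char.ofNat (48+d3)] := by
  have hf0 : PySem.Int.floordiv ((d0*10+d1 : ℕ) : ℤ) 10 = (d0 : ℤ) := by
    rw [PySem.Int.floordiv_eq_iff_of_pos (by norm_num)]
    push_cast
    constructor <;> nlinarith
  have hm0 : PySem.Int.mod ((d0*10+d1 : ℕ) : ℤ) 10 = (d1 : ℤ) := by
    have h := PySem.Int.floordiv_mul_add_mod ((d0*10+d1 : ℕ) : ℤ) 10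
    rw [hf0] at h
    push_cast at h ⊢
    linarith
  have hf2 : PySem.Int.floordiv ((d2*10+d3 : ℕ) : ℤ) 10 = (d2 : ℤ) := by
    rw [PySem.Int.floordiv_eq_iff_of_pos (by norm_num)]
    push_cast
    constructor <;> nlinarith
  have hm2 : PySem.Int.mod ((d2*10+d3 : ℕ) : ℤ) 10 = (d3 : ℤ) := by
    have h := PySem.Int.floordiv_mul_add_mod ((d2*10+d3 : ℕ) : ℤ) 10
    rw [hf2] at h
    push_cast at h ⊢
    linarith
  unfold pvNeed
  rw [hf0, hm0, hf2, hm2, pv_toChars_digit d0 h0, pv_toChars_digit d1 h1,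
      pv_toChars_digit d2 h2, pv_toChars_digit d3 h3]
  rfl

-- the central bridge: over an all-digit pool of length ≥ 4, A's permutation scan and B's
-- candidate-time scan accept exactly the same strings
lemma pv_bridge (a : List Char)
    (hdig : ∀ c ∈ a, ∃ d : ℕ, d < 10 ∧ c = Char.ofNat (48 + d))
    (hlen : 4 ≤ a.length) (t : String) :
    (∃ y ∈ PySem.List.permutations a a.length, pvCondA y ∧ t = pvTimeA y) ↔
    (∃ h ∈ PySem.List.pyRange 0 24 1, ∃ m ∈ PySem.List.pyRange 0 60 1, pvCondB a h m ∧ t = pvTime h m) := by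
  constructor
  · rintro ⟨y, hy, hcond, ht⟩
    obtain ⟨hylen, hysub⟩ := (pv_mem_permutations _ _ _).mp hy
    have hyperm : y.Perm a := hysub.perm_of_length_le (le_of_eq hylen.symm)
    have h4 : 4 ≤ y.length := by omega
    obtain ⟨e0, e1, e2, e3, rest, rfl⟩ :
        ∃ e0 e1 e2 e3 rest, y = e0 :: e1 :: e2 :: e3 :: rest := by
      rcases y with _|⟨e0, _|⟨e1, _|⟨e2, _|⟨e3, rest⟩⟩⟩⟩ <;>
        first
          | exact ⟨_, _, _, _, _, rfl⟩
          | simp at h4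
    obtain ⟨d0, hd0, he0⟩ := hdig e0 (hyperm.subset (by simp))
    obtain ⟨d1, hd1, he1⟩ := hdig e1 (hyperm.subset (by simp))
    obtain ⟨d2, hd2, he2⟩ := hdig e2 (hyperm.subset (by simp))
    obtain ⟨d3, hd3, he3⟩ := hdig e3 (hyperm.subset (by simp))
    simp only [pvCondA] at hcond
    simp only [pvTimeA] at ht
    rw [pv_getD0, pv_getD1, pv_getD2, pv_getD3] at hcond ht
    rw [he0, he1, he2, he3] at hcond ht
    rw [pv_chInt_digit d0 hd0, pv_chInt_digit d1 hd1,
        pv_chInt_digit d2 hd2, pv_chInt_digit d3 hd3] at hcond ht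
    obtain ⟨⟨hm60, _⟩, ⟨hh24, _⟩⟩ := hcond
    have hq : [e0, e1, e2, e3].Subperm a := by
      have hsub : [e0, e1, e2, e3].Sublist (e0 :: e1 :: e2 :: e3 :: rest) :=
        (List.prefix_append [e0, e1, e2, e3] rest).sublist
      exact hsub.subperm.trans hyperm.subperm
    refine ⟨((d0*10+d1 : ℕ) : ℤ), ?_, ((d2*10+d3 : ℕ) : ℤ), ?_, ?_, ?_⟩
    · rw [PySem.List.mem_pyRange_one]
      constructor
      · positivity
      · push_cast at hh24 ⊢; linarith
    · rw [PySem.List.mem_pyRange_one]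
      constructor
      · positivity
      · push_cast at hm60 ⊢; linarith
    · unfold pvCondB
      rw [pv_need_eq d0 d1 d2 d3 hd0 hd1 hd2 hd3]
      rw [List.all_eq_true]
      intro c hc
      rw [decide_eq_true_eq, PySem.List.count_eq, PySem.List.count_eq]
      rw [he0, he1, he2, he3] at hq
      exact List.subperm_ext_iff.mp hq c hc
    · rw [ht]
      simp only [pvTime]
      push_cast
      rfl
  · rintro ⟨h, hh, m, hm, hcb, ht⟩
    rw [PySem.List.mem_pyRange_one] at hh hm
    obtain ⟨hh0, hh24⟩ := hh
    obtain ⟨hm0, hm60⟩ := hm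
    set hn := h.toNat with hhn
    set mn := m.toNat with hmn
    have hhe : h = ((hn/10*10 + hn%10 : ℕ) : ℤ) := by
      have : hn / 10 * 10 + hn % 10 = hn := by omega
      rw [this]; omega
    have hme : m = ((mn/10*10 + mn%10 : ℕ) : ℤ) := by
      have : mn / 10 * 10 + mn % 10 = mn := by omega
      rw [this]; omega
    have hd0 : hn / 10 < 10 := by omega
    have hd1 : hn % 10 < 10 := by omega
    have hd2 : mn / 10 < 10 := by omega
    have hd3 : mn % 10 < 10 := by omega
    rw [hhe, hme] at hcb ht
    unfold pvCondB at hcb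
    rw [pv_need_eq _ _ _ _ hd0 hd1 hd2 hd3] at hcb
    have hq : [Char.ofNat (48+hn/10), Char.ofNat (48+hn%10),
               Char.ofNat (48+mn/10), Char.ofNat (48+mn%10)].Subperm a := by
      rw [List.subperm_ext_iff]
      intro x hx
      have := List.all_eq_true.mp hcb x hx
      rw [decide_eq_true_eq, PySem.List.count_eq, PySem.List.count_eq] at this
      exact this
    obtain ⟨y, hyperm, hpre⟩ := pv_exists_perm_with_prefix _ _ hq
    obtain ⟨rest, hrest⟩ := hpre
    refine ⟨y, ?_, ?_, ?_⟩
    · exact (pv_mem_permutations _ _ _).mpr ⟨hyperm.length_eq, hyperm.subperm⟩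
    · simp only [pvCondA]
      rw [← hrest]
      simp only [List.cons_append, List.nil_append]
      rw [pv_getD0, pv_getD1, pv_getD2, pv_getD3]
      rw [pv_chInt_digit _ hd0, pv_chInt_digit _ hd1, pv_chInt_digit _ hd2, pv_chInt_digit _ hd3]
      refine ⟨⟨?_, by positivity⟩, ⟨?_, by positivity⟩⟩
      · push_cast at hme hm60 ⊢
        omega
      · push_cast at hhe hh24 ⊢
        omega
    · rw [ht]
      simp only [pvTime, pvTimeA]
      rw [← hrest]
      simp only [List.cons_append, List.nil_append]
      rw [pv_getD0, pv_getD1, pv_getD2, pv_getD3]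
      rw [pv_chInt_digit _ hd0, pv_chInt_digit _ hd1, pv_chInt_digit _ hd2, pv_chInt_digit _ hd3]
      push_cast
      rfl

-- ===== VERDICT (by name: the statement is the Claim_ definition above) =====
theorem solution_spec : Claim_equal_solution := by
  intro A B C D _ hpre
  obtain ⟨hA, hB, hC, hD⟩ := hpre
  simp only [Spec_solution, solution, solution_alt]
  set a := PySem.Int.toChars A ++ PySem.Int.toChars B ++ PySem.Int.toChars C ++ PySem.Int.toChars D with ha
  have hdig : ∀ c ∈ a, ∃ d : ℕ, d < 10 ∧ c = Char.ofNat (48 + d) := by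
    intro c hc
    rw [ha] at hc
    simp only [List.mem_append] at hc
    rcases hc with ((hc | hc) | hc) | hc
    · exact pv_mem_toChars_digit A hA c hc
    · exact pv_mem_toChars_digit B hB c hc
    · exact pv_mem_toChars_digit C hC c hc
    · exact pv_mem_toChars_digit D hD c hc
  have hlen4 : 4 ≤ a.length := by
    rw [ha]
    simp only [List.length_append]
    have h1 := List.length_pos_of_ne_nil (pv_toChars_ne_nil A)
    have h2 := List.length_pos_of_ne_nil (pv_toChars_ne_nil B)
    have h3 := List.length_pos_of_ne_nil (pv_toChars_ne_nil C)
    have h4 := List.length_pos_of_ne_nil (pv_toChars_ne_nil D)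
    omega
  have hlower : List.map PySem.Chars.lowerChar a = a := by
    have : ∀ c ∈ a, PySem.Chars.lowerChar c = c := by
      intro c hc
      obtain ⟨d, hd, rfl⟩ := hdig c hc
      exact pv_lowerChar_digit d hd
    calc List.map PySem.Chars.lowerChar a = List.map id a := List.map_congr_left this
    _ = a := List.map_id a
  rw [hlower]
  -- membership characterisations of the two result sets
  have memA : ∀ t, (t ∈ (PySem.List.pyRange 2 (PySem.List.len a) 1).foldl
      (fun op _ => (PySem.List.permutations a a.length).foldl pvStepA op) PySem.Set.empty) ↔
      (∃ y ∈ PySem.List.permutations a a.length, pvCondA y ∧ t = pvTimeA y) := by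
    intro t
    rw [pv_mem_foldl _ (fun _ t => ∃ y ∈ PySem.List.permutations a a.length, pvCondA y ∧ t = pvTimeA y)
      (fun s n t => pv_mem_foldl pvStepA (fun y t => pvCondA y ∧ t = pvTimeA y) pv_mem_stepA _ s t)]
    constructor
    · rintro (h | ⟨n, _, h⟩)
      · simp [PySem.Set.empty] at h
      · exact h
    · intro h
      refine Or.inr ⟨2, ?_, h⟩
      rw [PySem.List.mem_pyRange_one]
      rw [PySem.List.len_eq]
      omega
  have memB : ∀ t, (t ∈ (PySem.List.pyRange 0 24 1).foldl
      (fun ts h => (PySem.List.pyRange 0 60 1).foldl (pvStepB a h) ts) PySem.Set.empty) ↔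
      (∃ h ∈ PySem.List.pyRange 0 24 1, ∃ m ∈ PySem.List.pyRange 0 60 1, pvCondB a h m ∧ t = pvTime h m) := by
    intro t
    rw [pv_mem_foldl _ (fun h t => ∃ m ∈ PySem.List.pyRange 0 60 1, pvCondB a h m ∧ t = pvTime h m)
      (fun s h t => pv_mem_foldl (pvStepB a h) (fun m t => pvCondB a h m ∧ t = pvTime h m)
        (pv_mem_stepB a h) _ s t)]
    constructor
    · rintro (h | h)
      · simp [PySem.Set.empty] at h
      · exact h
    · exact Or.inr
  have ndA : ((PySem.List.pyRange 2 (PySem.List.len a) 1).foldl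
      (fun op _ => (PySem.List.permutations a a.length).foldl pvStepA op) PySem.Set.empty).Nodup := by
    apply pv_nodup_foldl _ (fun s n hs => pv_nodup_foldl pvStepA pv_nodup_stepA _ s hs)
    simp [PySem.Set.empty]
  have ndB : ((PySem.List.pyRange 0 24 1).foldl
      (fun ts h => (PySem.List.pyRange 0 60 1).foldl (pvStepB a h) ts) PySem.Set.empty).Nodup := by
    apply pv_nodup_foldl _ (fun s h hs => pv_nodup_foldl (pvStepB a h) (pv_nodup_stepB a h) _ s hs)
    simp [PySem.Set.empty]
  have hperm := (List.perm_ext_iff_of_nodup ndA ndB).mpr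
    (fun t => (memA t).trans ((pv_bridge a hdig hlen4 t).trans (memB t).symm))
  simp only [PySem.Set.len]
  exact_mod_cast hperm.length_eq
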